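-- pv_equiv track=rewrite | github.com/changchen2002/LeetCode | 4056-longest-balanced-substring-ii/longest-balanced-substring-ii.py | longestBalanced
-- ===== SOURCE A (Python) =====
-- def longestBalanced(s: str) -> int:
--     a=b=c=0
--     seen={
--         ("abc", 0, 0): -1,  # 三字符等频： (a-b, a-c)
--         ("ab",  0, 0): -1,  # 仅 {a,b}： (a-b, c_total)  保证 c 不变
--         ("bc",  0, 0): -1,  # 仅 {b,c}： (b-c, a_total)  保证 a 不变
--         ("ca",  0, 0): -1,  # 仅 {c,a}： (c-a, b_total)  保证 b 不变
--         ("a",   0, 0): -1,  # 仅 a：    (b_total, c_total)  二者不变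
--         ("b",   0, 0): -1,  # 仅 b
--         ("c",   0, 0): -1,
--     }
--     res=0
--     for i,ch in enumerate(s):
--         if ch=='a':
--             a+=1
--         elif ch=='b':
--             b+=1
--         else:
--             c+=1
--         keys=[
--             ("abc", a - b, a - c),
--             ("ab",  a - b, c),
--             ("bc",  b - c, a),
--             ("ca",  c - a, b),
--             ("a",   b, c),
--             ("b",   c, a),
--             ("c",   a, b),
--         ]
--         for key in keys:
--             if key in seen:
--                 res=max(res,i-seen[key])
--             else:
--                 seen[key]=i
--     return res
-- ===== SOURCE B (Python) =====
-- def longestBalanced(s: str) -> int: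
--     # Brute force: for every start, scan forward keeping counts (every non-'a'/'b'
--     # char counts as 'c', as in the original); a window is balanced when all
--     # characters that occur in it occur equally often.
--     res = 0
--     for i in range(len(s)):
--         ca = cb = cc = 0
--         length = 0
--         for ch in s[i:]:
--             length += 1
--             if ch == 'a':
--                 ca += 1
--             elif ch == 'b':
--                 cb += 1
--             else:
--                 cc += 1
--             if ((ca == 0 or cb == 0 or ca == cb)
--                     and (ca == 0 or cc == 0 or ca == cc)
--                     and (cb == 0 or cc == 0 or cb == cc)):
--                 res = max(res, length)
--     return res
-- ===== Notes on version B (the rewrite author's own statement) =====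
-- stated objective: simpler
-- what changed: Replaces the single-pass prefix-state hash map with seven key families by a direct nested scan over all substrings that keeps running counts and tests the balanced predicate (every character that occurs in the window occurs equally often, any non-'a'/'b' char counted as 'c').
import Mathlib
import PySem

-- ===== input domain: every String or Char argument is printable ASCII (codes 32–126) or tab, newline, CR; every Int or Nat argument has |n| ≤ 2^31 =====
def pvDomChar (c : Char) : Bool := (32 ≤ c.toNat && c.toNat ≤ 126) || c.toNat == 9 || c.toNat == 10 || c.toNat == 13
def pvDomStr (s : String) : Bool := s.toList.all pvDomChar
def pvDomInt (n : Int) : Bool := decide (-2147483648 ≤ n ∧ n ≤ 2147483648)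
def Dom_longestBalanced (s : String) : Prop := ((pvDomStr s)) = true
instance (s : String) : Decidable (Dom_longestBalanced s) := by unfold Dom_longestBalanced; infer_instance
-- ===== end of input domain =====

-- B replaces A's one-pass prefix-state hash map (seven key families) by a plain
-- nested scan of all substrings with running counts and a direct balancedness test:
-- simpler and more obviously correct, at the price of a quadratic instead of linear pass.

-- ===== PORT A =====
-- the seven keys A computes from the running prefix counts, in A's order
def pvKeysA (a b c : Int) : List (String × Int × Int) :=
  [("abc", a - b, a - c), ("ab", a - b, c), ("bc", b - c, a), ("ca", c - a, b),
   ("a", b, c), ("b", c, a), ("c", a, b)]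

-- Python: `if key in seen: res = max(res, i - seen[key]) else: seen[key] = i`
def pvStepKey (i : Int)
    (st : PySem.Dict (String × Int × Int) Int × Int) (key : String × Int × Int) :
    PySem.Dict (String × Int × Int) Int × Int :=
  match st.1.get? key with
  | some v => (st.1, max st.2 (i - v))
  | none => (st.1.insert key i, st.2)

-- A's loop body: bump the counts for the current char, then fold over the seven keys
def pvStepA (st : (Int × Int × Int) × PySem.Dict (String × Int × Int) Int × Int)
    (p : Int × Char) :
    (Int × Int × Int) × PySem.Dict (String × Int × Int) Int × Int :=
  let cn :=
    if p.2 = 'a' then (st.1.1 + 1, st.1.2.1, st.1.2.2)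
    else if p.2 = 'b' then (st.1.1, st.1.2.1 + 1, st.1.2.2)
    else (st.1.1, st.1.2.1, st.1.2.2 + 1)
  let sr := (pvKeysA cn.1 cn.2.1 cn.2.2).foldl (pvStepKey p.1) (st.2.1, st.2.2)
  (cn, sr.1, sr.2)

-- A's initial dict literal
def pvSeen0 : PySem.Dict (String × Int × Int) Int :=
  PySem.Dict.ofList
    [(("abc", 0, 0), -1), (("ab", 0, 0), -1), (("bc", 0, 0), -1), (("ca", 0, 0), -1),
     (("a", 0, 0), -1), (("b", 0, 0), -1), (("c", 0, 0), -1)]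

def longestBalanced (s : String) : Int :=
  ((PySem.List.enumerate s.toList 0).foldl pvStepA ((0, 0, 0), pvSeen0, 0)).2.2

-- ===== PORT B =====
-- bump the (a, b, c) counts for one char; any non-'a'/'b' char counts as 'c'
def pvBump (t : Int × Int × Int) (ch : Char) : Int × Int × Int :=
  if ch = 'a' then (t.1 + 1, t.2.1, t.2.2)
  else if ch = 'b' then (t.1, t.2.1 + 1, t.2.2)
  else (t.1, t.2.1, t.2.2 + 1)

-- balanced window test: the counts that are nonzero are pairwise equal
def pvOk (a b c : Int) : Bool :=
  ((a == 0) || (b == 0) || (a == b)) && ((a == 0) || (c == 0) || (a == c)) &&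
    ((b == 0) || (c == 0) || (b == c))

-- B's inner loop body over one more window char
def pvStepB (st : (Int × Int × Int) × Int × Int) (ch : Char) :
    (Int × Int × Int) × Int × Int :=
  let cn := pvBump st.1 ch
  let len := st.2.1 + 1
  (cn, len, if pvOk cn.1 cn.2.1 cn.2.2 then max st.2.2 len else st.2.2)

-- Python's `s[i:]` with 0 ≤ i is exactly `List.drop i` on the char list
def longestBalanced_alt (s : String) : Int :=
  (List.range s.toList.length).foldl
    (fun res i => ((s.toList.drop i).foldl pvStepB ((0, 0, 0), 0, res)).2.2) 0

-- ===== PRECONDITION & SPEC =====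
def Spec_longestBalanced (s : String) (out : Int) : Prop := out = longestBalanced_alt s
instance (s : String) (out : Int) : Decidable (Spec_longestBalanced s out) := by unfold Spec_longestBalanced; infer_instance

-- ===== CLAIM (what is proved, stated in full; the proofs are below) =====
def Claim_equal_longestBalanced : Prop := ∀ (s : String), Dom_longestBalanced s → Spec_longestBalanced s (longestBalanced s)

-- ===== LEMMAS AND PROOFS =====

-- counts of a char list (the value both loops maintain)
def pvCnt (l : List Char) : Int × Int × Int := l.foldl pvBump (0, 0, 0)

def pvNAMES : List String := ["abc", "ab", "bc", "ca", "a", "b", "c"]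

-- the key A files under a given name, as a function of the prefix counts
def pvKey (name : String) (t : Int × Int × Int) : Int × Int :=
  if name = "abc" then (t.1 - t.2.1, t.1 - t.2.2)
  else if name = "ab" then (t.1 - t.2.1, t.2.2)
  else if name = "bc" then (t.2.1 - t.2.2, t.1)
  else if name = "ca" then (t.2.2 - t.1, t.2.1)
  else if name = "a" then (t.2.1, t.2.2)
  else if name = "b" then (t.2.2, t.1)
  else (t.1, t.2.1)

-- pure recurrence computing A's res
def pvInnerA (l : List Char) (q : Nat) (r : Int) : Int :=
  pvNAMES.foldl
    (fun r name =>
      match (List.range q).find?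
          (fun p => pvKey name (pvCnt (l.take p)) == pvKey name (pvCnt (l.take q))) with
      | some p => max r ((q : Int) - p)
      | none => r) r

def pvResA (l : List Char) : Nat → Int
  | 0 => 0
  | q + 1 => pvInnerA l (q + 1) (pvResA l (q))

-- the pair (p, q) delimits a balanced window of l
def pvOkPair (l : List Char) (p q : Nat) : Prop :=
  p < q ∧ q ≤ l.length ∧
    pvOk ((pvCnt (l.take q)).1 - (pvCnt (l.take p)).1)
      ((pvCnt (l.take q)).2.1 - (pvCnt (l.take p)).2.1)
      ((pvCnt (l.take q)).2.2 - (pvCnt (l.take p)).2.2) = true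

-- "r is the maximum balanced-window length of l"
def pvIsBest (l : List Char) (r : Int) : Prop :=
  0 ≤ r ∧ (∀ p q : Nat, pvOkPair l p q → (q : Int) - p ≤ r) ∧
    (r = 0 ∨ ∃ p q : Nat, pvOkPair l p q ∧ r = (q : Int) - p)

-- dict invariant for A's loop: after j chars, `seen` holds for each name the first
-- prefix index with that key, shifted by -1
def pvSeenInv (l : List Char) (j : Nat) (d : PySem.Dict (String × Int × Int) Int) : Prop :=
  ∀ name ∈ pvNAMES, ∀ t : Int × Int,
    d.get? (name, t.1, t.2) =
      ((List.range (j + 1)).find? (fun p => pvKey name (pvCnt (l.take p)) == t)).map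
        (fun p => (p : Int) - 1)

theorem pv_isBest_unique (l : List Char) (r r' : Int)
    (h : pvIsBest l r) (h' : pvIsBest l r') : r = r' := by
  obtain ⟨h0, hub, hach⟩ := h
  obtain ⟨h0', hub', hach'⟩ := h'
  apply le_antisymm
  · rcases hach with rfl | ⟨p, q, hpq, rfl⟩
    · exact h0'
    · exact hub' p q hpq
  · rcases hach' with rfl | ⟨p, q, hpq, rfl⟩
    · exact h0
    · exact hub p q hpq

-- generic fold lemmas for "max-accumulating" folds with an Int accumulator
theorem pv_foldl_ge_init {α : Type} (g : Int → α → Int)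
    (hmono : ∀ r x, r ≤ g r x) (xs : List α) (r : Int) : r ≤ xs.foldl g r := by
  induction xs generalizing r with
  | nil => exact le_refl r
  | cons x xs ih => exact le_trans (hmono r x) (ih _)

theorem pv_le_foldl_of_mem {α : Type} (g : Int → α → Int)
    (hmono : ∀ r x, r ≤ g r x) (v : Int) (x : α) (xs : List α) (hx : x ∈ xs)
    (hv : ∀ r, v ≤ g r x) : ∀ r, v ≤ xs.foldl g r := by
  induction xs with
  | nil => cases hx
  | cons y ys ih =>
    intro r
    rcases List.mem_cons.1 hx with rfl | hmem
    · exact le_trans (hv r) (pv_foldl_ge_init g hmono ys _)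
    · exact ih hmem _
    
theorem pv_foldl_preserve {α : Type} (P : Int → Prop) (g : Int → α → Int)
    (xs : List α) (hstep : ∀ r, ∀ x ∈ xs, P r → P (g r x)) :
    ∀ r, P r → P (xs.foldl g r) := by
  induction xs with
  | nil => exact fun r h => h
  | cons x xs ih =>
    exact fun r h =>
      ih (fun r x hx => hstep r x (List.mem_cons_of_mem _ hx)) _
        (hstep r x List.mem_cons_self h)

-- find? on a range returns the least satisfying index
theorem pv_range_find?_min (q : Nat) (f : Nat → Bool) (p : Nat)
    (hp : p < q) (hf : f p = true) :
    ∃ p', (List.range q).find? f = some p' ∧ p' ≤ p ∧ f p' = true := by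
  induction q with
  | zero => omega
  | succ q ih =>
    rw [List.range_succ, List.find?_append]
    rcases Nat.lt_or_ge p q with h | h
    · obtain ⟨p', hfind, hle, hfp'⟩ := ih h
      exact ⟨p', by simp [hfind], hle, hfp'⟩
    · have hpq : p = q := by omega
      subst hpq
      cases hfound : (List.range p).find? f with
      | none => exact ⟨p, by simp [hf], le_refl p, hf⟩
      | some p' =>
        have hm := List.mem_of_find?_eq_some hfound
        have : p' < p := List.mem_range.1 hm
        exact ⟨p', by simp, by omega, List.find?_some hfound⟩

-- counts facts
theorem pvCnt_foldl_from (t : Int × Int × Int) (v : List Char) :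
    v.foldl pvBump t =
      (t.1 + (pvCnt v).1, t.2.1 + (pvCnt v).2.1, t.2.2 + (pvCnt v).2.2) := by
  induction v generalizing t with
  | nil => simp [pvCnt]
  | cons x xs ih =>
    simp only [pvCnt, List.foldl_cons]
    rw [ih (pvBump t x), ih (pvBump (0, 0, 0) x)]
    unfold pvBump
    split_ifs <;> simp <;> ring

theorem pvCnt_append (u v : List Char) :
    pvCnt (u ++ v) =
      ((pvCnt u).1 + (pvCnt v).1, (pvCnt u).2.1 + (pvCnt v).2.1,
        (pvCnt u).2.2 + (pvCnt v).2.2) := by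
  simp only [pvCnt, List.foldl_append]
  exact pvCnt_foldl_from _ v

theorem pvCnt_nonneg (l : List Char) :
    0 ≤ (pvCnt l).1 ∧ 0 ≤ (pvCnt l).2.1 ∧ 0 ≤ (pvCnt l).2.2 := by
  induction l with
  | nil => simp [pvCnt]
  | cons x xs ih =>
    have h := pvCnt_foldl_from (pvBump (0, 0, 0) x) xs
    have hb : pvBump (0, 0, 0) x = (1, 0, 0) ∨ pvBump (0, 0, 0) x = (0, 1, 0) ∨
        pvBump (0, 0, 0) x = (0, 0, 1) := by unfold pvBump; split_ifs <;> simp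
    simp only [pvCnt, List.foldl_cons] at *
    rw [h]
    rcases hb with hb | hb | hb <;> rw [hb] <;> simp <;> omega

theorem pvCnt_sum (l : List Char) :
    (pvCnt l).1 + (pvCnt l).2.1 + (pvCnt l).2.2 = l.length := by
  induction l with
  | nil => simp [pvCnt]
  | cons x xs ih =>
    have h := pvCnt_foldl_from (pvBump (0, 0, 0) x) xs
    have hb : pvBump (0, 0, 0) x = (1, 0, 0) ∨ pvBump (0, 0, 0) x = (0, 1, 0) ∨
        pvBump (0, 0, 0) x = (0, 0, 1) := by unfold pvBump; split_ifs <;> simp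
    simp only [pvCnt, List.foldl_cons, List.length_cons] at *
    rw [h]
    rcases hb with hb | hb | hb <;> rw [hb] <;> simp <;> omega

theorem pvCnt_take_succ (l : List Char) (j : Nat) (hj : j < l.length) :
    pvCnt (l.take (j + 1)) = pvBump (pvCnt (l.take j)) l[j] := by
  rw [List.take_add_one, List.getElem?_eq_getElem hj]
  simp only [Option.toList]
  rw [pvCnt_append]
  rw [show pvCnt [l[j]] = pvBump (0, 0, 0) l[j] from rfl]
  unfold pvBump
  split_ifs <;> simp

theorem pv_match_iff (l : List Char) (p q : Nat) (hpq : p < q) (hq : q ≤ l.length) :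
    (∃ name ∈ pvNAMES, pvKey name (pvCnt (l.take p)) = pvKey name (pvCnt (l.take q))) ↔
      pvOk ((pvCnt (l.take q)).1 - (pvCnt (l.take p)).1)
        ((pvCnt (l.take q)).2.1 - (pvCnt (l.take p)).2.1)
        ((pvCnt (l.take q)).2.2 - (pvCnt (l.take p)).2.2) = true := by
  have hsplit : l.take q = l.take p ++ (l.take q).drop p := by
    nth_rewrite 1 [← List.take_append_drop p (l.take q)]
    rw [List.take_take, Nat.min_eq_left (le_of_lt hpq)]
  have hlen : ((l.take q).drop p).length = q - p := by
    rw [List.length_drop, List.length_take]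
    omega
  have hmid := pvCnt_nonneg ((l.take q).drop p)
  have hsum := pvCnt_sum ((l.take q).drop p)
  rw [hlen] at hsum
  have hcnt := pvCnt_append (l.take p) ((l.take q).drop p)
  rw [← hsplit] at hcnt
  obtain ⟨x, y, z, hm⟩ : ∃ x y z, pvCnt ((l.take q).drop p) = (x, y, z) :=
    ⟨_, _, _, rfl⟩
  rw [hm] at hcnt hmid hsum
  rw [hcnt]
  simp only [pvNAMES, List.mem_cons, List.not_mem_nil, or_false, exists_eq_or_imp,
    exists_eq_left]
  simp [pvKey, pvOk, Prod.ext_iff]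
  obtain ⟨n1, n2, n3⟩ := hmid
  dsimp only at *
  omega

-- ===== A-side: the port computes pvResA =====

theorem pv_stepKey_spec (l : List Char) (j : Nat) (name : String)
    (d : PySem.Dict (String × Int × Int) Int) (res : Int)
    (hd : ∀ t : Int × Int, d.get? (name, t.1, t.2) =
      ((List.range (j + 1)).find? (fun p => pvKey name (pvCnt (l.take p)) == t)).map
        (fun p => (p : Int) - 1)) :
    (∀ t' : Int × Int,
        (pvStepKey (j : Int) (d, res)
          (name, (pvKey name (pvCnt (l.take (j + 1)))).1,
            (pvKey name (pvCnt (l.take (j + 1)))).2)).1.get? (name, t'.1, t'.2) =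
        ((List.range (j + 2)).find? (fun p => pvKey name (pvCnt (l.take p)) == t')).map
          (fun p => (p : Int) - 1)) ∧
    (∀ k : String × Int × Int, k.1 ≠ name →
        (pvStepKey (j : Int) (d, res)
          (name, (pvKey name (pvCnt (l.take (j + 1)))).1,
            (pvKey name (pvCnt (l.take (j + 1)))).2)).1.get? k = d.get? k) ∧
    (pvStepKey (j : Int) (d, res)
        (name, (pvKey name (pvCnt (l.take (j + 1)))).1,
          (pvKey name (pvCnt (l.take (j + 1)))).2)).2 =
      (match (List.range (j + 1)).find?
          (fun p => pvKey name (pvCnt (l.take p)) == pvKey name (pvCnt (l.take (j + 1)))) with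
        | some p => max res ((j : Int) + 1 - p)
        | none => res) := by
  have hrange : List.range (j + 2) = List.range (j + 1) ++ [j + 1] := List.range_succ
  set T := pvKey name (pvCnt (l.take (j + 1))) with hT
  have hfind1 : ∀ t' : Int × Int, [j + 1].find? (fun p => pvKey name (pvCnt (l.take p)) == t') =
      if T = t' then some (j + 1) else none := by
    intro t'
    simp only [List.find?, ← hT]
    by_cases h : T = t'
    · simp [h]
    · have hb : (T == t') = false := beq_eq_false_iff_ne.mpr h
      simp [hb, h]
  cases hfound : (List.range (j + 1)).find? (fun p => pvKey name (pvCnt (l.take p)) == T) with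
  | some p0 =>
    have hget : d.get? (name, T.1, T.2) = some ((p0 : Int) - 1) := by rw [hd T, hfound]; rfl
    have hstep : pvStepKey (j : Int) (d, res) (name, T.1, T.2) =
        (d, max res ((j : Int) - ((p0 : Int) - 1))) := by
      unfold pvStepKey
      rw [hget]
    refine ⟨?_, ?_, ?_⟩
    · intro t'
      rw [hstep]
      dsimp only
      rw [hd t', hrange, List.find?_append, hfind1 t']
      by_cases ht' : T = t'
      · rw [← ht', hfound]
        rfl
      · simp [ht']
    · intro k hk
      rw [hstep]
    · rw [hstep]
      dsimp only
      have : (j : Int) - ((p0 : Int) - 1) = (j : Int) + 1 - (p0 : Int) := by ring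
      rw [this]
  | none =>
    have hget : d.get? (name, T.1, T.2) = none := by rw [hd T, hfound]; rfl
    have hstep : pvStepKey (j : Int) (d, res) (name, T.1, T.2) =
        (d.insert (name, T.1, T.2) (j : Int), res) := by
      unfold pvStepKey
      rw [hget]
    refine ⟨?_, ?_, ?_⟩
    · intro t'
      rw [hstep]
      dsimp only
      rw [PySem.Dict.get?_insert, hrange, List.find?_append, hfind1 t']
      by_cases ht' : T = t'
      · rw [← ht', hfound]
        simp
      · have hne : ((name, t'.1, t'.2) : String × Int × Int) ≠ (name, T.1, T.2) := by
          simp only [ne_eq, Prod.mk.injEq, not_and]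
          intro _ h1 h2
          exact ht' (by apply Prod.ext <;> simp [h1, h2])
        rw [hd t']
        simp [hne, ht']
    · intro k hk
      rw [hstep]
      dsimp only
      rw [PySem.Dict.get?_insert]
      have hne : k ≠ ((name, T.1, T.2) : String × Int × Int) := by
        intro h
        exact hk (by rw [h])
      simp [hne]
    · rw [hstep]

theorem pv_innerFold_spec (l : List Char) (j : Nat) (ns : List String)
    (hnd : ns.Nodup) :
    ∀ (d : PySem.Dict (String × Int × Int) Int) (res : Int),
    (∀ name ∈ ns, ∀ t : Int × Int, d.get? (name, t.1, t.2) =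
      ((List.range (j + 1)).find? (fun p => pvKey name (pvCnt (l.take p)) == t)).map
        (fun p => (p : Int) - 1)) →
    (∀ name ∈ ns, ∀ t : Int × Int,
        ((ns.map (fun name => (name, (pvKey name (pvCnt (l.take (j + 1)))).1,
            (pvKey name (pvCnt (l.take (j + 1)))).2))).foldl (pvStepKey (j : Int))
          (d, res)).1.get? (name, t.1, t.2) =
        ((List.range (j + 2)).find? (fun p => pvKey name (pvCnt (l.take p)) == t)).map
          (fun p => (p : Int) - 1)) ∧
    (∀ k : String × Int × Int, k.1 ∉ ns →
        ((ns.map (fun name => (name, (pvKey name (pvCnt (l.take (j + 1)))).1,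
            (pvKey name (pvCnt (l.take (j + 1)))).2))).foldl (pvStepKey (j : Int))
          (d, res)).1.get? k = d.get? k) ∧
    ((ns.map (fun name => (name, (pvKey name (pvCnt (l.take (j + 1)))).1,
        (pvKey name (pvCnt (l.take (j + 1)))).2))).foldl (pvStepKey (j : Int))
      (d, res)).2 =
      ns.foldl
        (fun r name =>
          match (List.range (j + 1)).find?
              (fun p => pvKey name (pvCnt (l.take p)) == pvKey name (pvCnt (l.take (j + 1)))) with
          | some p => max r ((j : Int) + 1 - p)
          | none => r) res := by
  induction ns with
  | nil => exact fun d res _ => ⟨fun _ h => absurd h (List.not_mem_nil), fun _ _ => rfl, rfl⟩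
  | cons n0 rest ih =>
    intro d res hd
    obtain ⟨hn0, hrest⟩ := List.nodup_cons.1 hnd
    obtain ⟨h1, h2, h3⟩ := pv_stepKey_spec l j n0 d res (hd n0 (List.mem_cons_self))
    rcases hstpair : pvStepKey (j : Int) (d, res)
      (n0, (pvKey n0 (pvCnt (l.take (j + 1)))).1, (pvKey n0 (pvCnt (l.take (j + 1)))).2)
      with ⟨d1, r1⟩
    rw [hstpair] at h1 h2 h3
    dsimp only at h1 h2 h3
    have hdrest : ∀ name ∈ rest, ∀ t : Int × Int, d1.get? (name, t.1, t.2) =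
        ((List.range (j + 1)).find? (fun p => pvKey name (pvCnt (l.take p)) == t)).map
          (fun p => (p : Int) - 1) := by
      intro name hmem t
      have hne : ((name, t.1, t.2) : String × Int × Int).1 ≠ n0 := fun h => hn0 (h ▸ hmem)
      rw [h2 (name, t.1, t.2) hne]
      exact hd name (List.mem_cons_of_mem _ hmem) t
    obtain ⟨g1, g2, g3⟩ := ih hrest d1 r1 hdrest
    refine ⟨?_, ?_, ?_⟩
    · intro name hmem t
      rcases List.mem_cons.1 hmem with rfl | hmem'
      · rw [List.map_cons, List.foldl_cons, hstpair,
          g2 (name, t.1, t.2) (by simpa using hn0)]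
        exact h1 t
      · rw [List.map_cons, List.foldl_cons, hstpair]
        exact g1 name hmem' t
    · intro k hk
      rw [List.map_cons, List.foldl_cons, hstpair,
        g2 k (fun h => hk (List.mem_cons_of_mem _ h)),
        h2 k (fun h => hk (h ▸ List.mem_cons_self))]
    · rw [List.map_cons, List.foldl_cons, hstpair, List.foldl_cons, g3, h3]

theorem pvKeysA_eq (t : Int × Int × Int) :
    pvKeysA t.1 t.2.1 t.2.2 = pvNAMES.map
      (fun name => (name, (pvKey name t).1, (pvKey name t).2)) := by
  simp [pvKeysA, pvNAMES, pvKey]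

theorem pvNAMES_nodup : pvNAMES.Nodup := by decide

theorem pv_stepA_eq (c : Int × Int × Int) (d : PySem.Dict (String × Int × Int) Int)
    (r i : Int) (ch : Char) :
    pvStepA (c, d, r) (i, ch) =
      (pvBump c ch, (pvKeysA (pvBump c ch).1 (pvBump c ch).2.1 (pvBump c ch).2.2).foldl
        (pvStepKey i) (d, r)) := by
  rfl

theorem pv_loopA_suffix (l : List Char) (m : List Char) :
    ∀ (j : Nat) (d : PySem.Dict (String × Int × Int) Int),
    l.drop j = m → j ≤ l.length → pvSeenInv l j d →
    (((PySem.List.enumerate m (j : Int)).foldl pvStepA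
        (pvCnt (l.take j), d, pvResA l j)).2.2) = pvResA l l.length := by
  induction m with
  | nil =>
    intro j d hm hj _
    have : j = l.length := by
      have := congrArg List.length hm
      simp at this
      omega
    subst this
    simp [PySem.List.enumerate]
  | cons ch m' ih =>
    intro j d hm hj hinv
    have hjlt : j < l.length := by
      have := congrArg List.length hm
      simp at this
      omega
    have hch : l[j] = ch := by
      have : (l.drop j)[0]'(by rw [hm]; simp) = ch := by simp [hm]
      simpa using this
    have hcn : pvBump (pvCnt (l.take j)) ch = pvCnt (l.take (j + 1)) := by
      rw [pvCnt_take_succ l j hjlt, hch]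
    rw [PySem.List.enumerate_cons, List.foldl_cons, pv_stepA_eq, hcn,
      pvKeysA_eq (pvCnt (l.take (j + 1)))]
    obtain ⟨g1, g2, g3⟩ := pv_innerFold_spec l j pvNAMES pvNAMES_nodup d (pvResA l j) hinv
    rcases hpair : (pvNAMES.map (fun name => (name, (pvKey name (pvCnt (l.take (j + 1)))).1,
        (pvKey name (pvCnt (l.take (j + 1)))).2))).foldl (pvStepKey (j : Int))
        (d, pvResA l j) with ⟨d1, r1⟩
    rw [hpair] at g1 g3
    dsimp only at g1 g3
    have hres : r1 = pvResA l (j + 1) := by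
      rw [g3, pvResA]
      unfold pvInnerA
      simp only [Nat.cast_add, Nat.cast_one]
    have hinv' : pvSeenInv l (j + 1) d1 := by
      intro name hmem t
      exact g1 name hmem t
    have hm' : l.drop (j + 1) = m' := by
      rw [← List.tail_drop, hm]
      rfl
    have hfin := ih (j + 1) d1 hm' (by omega) hinv'
    simp only [Nat.cast_add, Nat.cast_one] at hfin
    rw [← hres] at hfin
    exact hfin
theorem pvKey_zero (name : String) (hmem : name ∈ pvNAMES) :
    pvKey name (0, 0, 0) = (0, 0) := by
  simp only [pvNAMES, List.mem_cons, List.not_mem_nil, or_false] at hmem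
  rcases hmem with rfl | rfl | rfl | rfl | rfl | rfl | rfl <;> rfl

theorem pv_seen0_inv (l : List Char) : pvSeenInv l 0 pvSeen0 := by
  have h : pvSeen0 = PySem.Dict.mk
      [(("abc", 0, 0), -1), (("ab", 0, 0), -1), (("bc", 0, 0), -1), (("ca", 0, 0), -1),
        (("a", 0, 0), -1), (("b", 0, 0), -1), (("c", 0, 0), -1)] := by rfl
  intro name hmem t
  have hfind : (List.range (0 + 1)).find?
      (fun p => pvKey name (pvCnt (l.take p)) == t) =
      if pvKey name (0, 0, 0) == t then some 0 else none := by
    rw [show List.range (0 + 1) = [0] from rfl]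
    simp only [List.find?, List.take_zero]
    rw [show pvCnt [] = ((0 : Int), (0 : Int), (0 : Int)) from rfl]
    cases hbe : pvKey name (0, 0, 0) == t <;> simp
  rw [hfind, pvKey_zero name hmem]
  by_cases ht : t = (0, 0)
  · rw [ht]
    rw [show (((0, 0) : Int × Int) == ((0, 0) : Int × Int)) = true from rfl]
    simp only [if_pos]
    simp only [pvNAMES, List.mem_cons, List.not_mem_nil, or_false] at hmem
    rcases hmem with rfl | rfl | rfl | rfl | rfl | rfl | rfl <;> rfl
  · rw [show (((0, 0) : Int × Int) == t) = false from beq_eq_false_iff_ne.mpr (fun hh => ht hh.symm)]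
    simp only [if_neg Bool.false_ne_true]
    cases hg : pvSeen0.get? (name, t.1, t.2) with
    | none => rfl
    | some v =>
      exfalso
      have hmemit := PySem.Dict.mem_items_of_get?_eq_some _ hg
      rw [h] at hmemit
      simp only [List.mem_cons, List.not_mem_nil, or_false, Prod.mk.injEq] at hmemit
      apply ht
      rcases hmemit with ⟨⟨_, h1, h2⟩, _⟩ | ⟨⟨_, h1, h2⟩, _⟩ | ⟨⟨_, h1, h2⟩, _⟩ |
        ⟨⟨_, h1, h2⟩, _⟩ | ⟨⟨_, h1, h2⟩, _⟩ | ⟨⟨_, h1, h2⟩, _⟩ | ⟨⟨_, h1, h2⟩, _⟩ <;>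
        (apply Prod.ext <;> dsimp only <;> omega)

theorem pv_A_eq_resA (s : String) :
    longestBalanced s = pvResA s.toList s.toList.length := by
  unfold longestBalanced
  have h0 : pvCnt (s.toList.take 0) = (0, 0, 0) := rfl
  have hr0 : pvResA s.toList 0 = 0 := rfl
  have := pv_loopA_suffix s.toList s.toList 0 pvSeen0 (by simp) (by simp)
    (pv_seen0_inv s.toList)
  rw [h0, hr0] at this
  exact_mod_cast this

-- ===== pvResA is the maximum =====

theorem pv_innerA_mono (l : List Char) (q : Nat) (r : Int) : r ≤ pvInnerA l q r := by
  unfold pvInnerA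
  apply pv_foldl_ge_init
  intro r name
  cases hfind : (List.range q).find?
      (fun p => pvKey name (pvCnt (l.take p)) == pvKey name (pvCnt (l.take q))) with
  | none => exact le_refl r
  | some p => exact le_max_left _ _

theorem pv_resA_nonneg (l : List Char) (j : Nat) : 0 ≤ pvResA l j := by
  induction j with
  | zero => exact le_refl 0
  | succ j ih =>
    rw [pvResA]
    exact le_trans ih (pv_innerA_mono l (j + 1) _)

theorem pv_resA_mono (l : List Char) (j j' : Nat) (h : j ≤ j') :
    pvResA l j ≤ pvResA l j' := by
  induction j' with
  | zero =>
    have : j = 0 := by omega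
    subst this
    exact le_refl _
  | succ j' ih =>
    rcases Nat.lt_or_ge j (j' + 1) with hlt | hge
    · rw [pvResA]
      exact le_trans (ih (by omega)) (pv_innerA_mono l (j' + 1) _)
    · have : j = j' + 1 := by omega
      subst this
      exact le_refl _

theorem pv_resA_complete (l : List Char) (p q : Nat) (h : pvOkPair l p q) :
    (q : Int) - p ≤ pvResA l l.length := by
  obtain ⟨hpq, hqlen, hok⟩ := h
  obtain ⟨name, hmem, hkeyeq⟩ := (pv_match_iff l p q hpq hqlen).2 hok
  have hfp : (fun p' => pvKey name (pvCnt (l.take p')) == pvKey name (pvCnt (l.take q))) p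
      = true := by simpa using hkeyeq
  obtain ⟨p', hfind, hle, _⟩ := pv_range_find?_min q
    (fun p' => pvKey name (pvCnt (l.take p')) == pvKey name (pvCnt (l.take q))) p hpq hfp
  cases q with
  | zero => omega
  | succ q0 =>
    have h1 : ((q0 + 1 : Nat) : Int) - p ≤ pvInnerA l (q0 + 1) (pvResA l q0) := by
      unfold pvInnerA
      refine pv_le_foldl_of_mem _ ?_ _ name pvNAMES hmem ?_ _
      · intro r nm
        cases hf2 : (List.range (q0 + 1)).find?
            (fun p => pvKey nm (pvCnt (l.take p)) == pvKey nm (pvCnt (l.take (q0 + 1)))) with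
        | none => exact le_refl r
        | some pp => exact le_max_left _ _
      · intro r
        rw [hfind]
        have hple : (p' : Int) ≤ (p : Int) := by exact_mod_cast hle
        refine le_trans (by omega) (le_max_right r _)
    exact le_trans h1 (by rw [← pvResA]; exact pv_resA_mono l _ _ hqlen)

theorem pv_resA_sound (l : List Char) (j : Nat) (hj : j ≤ l.length) :
    pvResA l j = 0 ∨ ∃ p q : Nat, pvOkPair l p q ∧ pvResA l j = (q : Int) - p := by
  have H : ∀ k : Nat, k ≤ l.length →
      (pvResA l k = 0 ∨ ∃ p q : Nat, pvOkPair l p q ∧ pvResA l k = (q : Int) - p) := by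
    intro k
    induction k with
    | zero => exact fun _ => Or.inl rfl
    | succ k ih =>
      intro hk
      rw [pvResA]
      unfold pvInnerA
      refine pv_foldl_preserve
        (fun r => r = 0 ∨ ∃ p q : Nat, pvOkPair l p q ∧ r = (q : Int) - p)
        _ pvNAMES ?_ _ (ih (by omega))
      intro r name hmem hP
      cases hfind : (List.range (k + 1)).find?
          (fun p => pvKey name (pvCnt (l.take p)) == pvKey name (pvCnt (l.take (k + 1)))) with
      | none => exact hP
      | some p =>
        have hplt : p < k + 1 := List.mem_range.1 (List.mem_of_find?_eq_some hfind)
        have hkeyeq : pvKey name (pvCnt (l.take p)) = pvKey name (pvCnt (l.take (k + 1))) := by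
          simpa using List.find?_some hfind
        have hok := (pv_match_iff l p (k + 1) hplt hk).1 ⟨name, hmem, hkeyeq⟩
        dsimp only
        rcases max_choice r (((k + 1 : Nat) : Int) - p) with hmx | hmx
        · rw [hmx]
          exact hP
        · rw [hmx]
          exact Or.inr ⟨p, k + 1, ⟨hplt, hk, hok⟩, rfl⟩
  exact H j hj

theorem pv_resA_isBest (l : List Char) : pvIsBest l (pvResA l l.length) :=
  ⟨pv_resA_nonneg l _, fun p q h => pv_resA_complete l p q h, pv_resA_sound l _ le_rfl⟩

-- ===== B-side: the port computes the maximum =====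

theorem pvCnt_append_singleton (u : List Char) (ch : Char) :
    pvCnt (u ++ [ch]) = pvBump (pvCnt u) ch := by
  rw [pvCnt_append, show pvCnt [ch] = pvBump (0, 0, 0) ch from rfl]
  unfold pvBump
  split_ifs <;> simp

theorem pvSeg_cnt (l : List Char) (i q : Nat) (hiq : i ≤ q) :
    pvCnt ((l.take q).drop i) =
      ((pvCnt (l.take q)).1 - (pvCnt (l.take i)).1,
        (pvCnt (l.take q)).2.1 - (pvCnt (l.take i)).2.1,
        (pvCnt (l.take q)).2.2 - (pvCnt (l.take i)).2.2) := by
  have hsplit : l.take q = l.take i ++ (l.take q).drop i := by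
    nth_rewrite 1 [← List.take_append_drop i (l.take q)]
    rw [List.take_take, Nat.min_eq_left hiq]
  have h := pvCnt_append (l.take i) ((l.take q).drop i)
  rw [← hsplit] at h
  rw [h]
  dsimp only
  refine Prod.ext ?_ (Prod.ext ?_ ?_) <;> dsimp only <;> ring

theorem pvSeg_succ (l : List Char) (i t : Nat) (h : i + t < l.length) :
    (l.take (i + t + 1)).drop i = (l.take (i + t)).drop i ++ [l[i + t]] := by
  rw [List.take_add_one, List.getElem?_eq_getElem h]
  simp only [Option.toList]
  rw [List.drop_append_of_le_length (by rw [List.length_take]; omega)]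

theorem pv_innerB_ge (m : List Char) :
    ∀ (c : Int × Int × Int) (t res : Int), res ≤ (m.foldl pvStepB (c, t, res)).2.2 := by
  induction m with
  | nil => exact fun _ _ res => le_refl res
  | cons ch m' ih =>
    intro c t res
    rw [List.foldl_cons]
    refine le_trans ?_ (ih (pvStepB (c, t, res) ch).1 (pvStepB (c, t, res) ch).2.1
      (pvStepB (c, t, res) ch).2.2)
    show res ≤ (pvStepB (c, t, res) ch).2.2
    dsimp only [pvStepB]
    split_ifs
    · exact le_max_left _ _
    · exact le_refl _

theorem pv_stepB_state (l : List Char) (i t : Nat) (res : Int) (ch : Char)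
    (hlen : i + t < l.length) (hch : l[i + t] = ch) :
    pvStepB (pvCnt ((l.take (i + t)).drop i), (t : Int), res) ch =
      (pvCnt ((l.take (i + t + 1)).drop i), ((t + 1 : Nat) : Int),
        if pvOk (pvCnt ((l.take (i + t + 1)).drop i)).1
            (pvCnt ((l.take (i + t + 1)).drop i)).2.1
            (pvCnt ((l.take (i + t + 1)).drop i)).2.2 then
          max res ((t : Int) + 1)
        else res) := by
  have hbump : pvBump (pvCnt ((l.take (i + t)).drop i)) ch =
      pvCnt ((l.take (i + t + 1)).drop i) := by
    rw [pvSeg_succ l i t hlen, pvCnt_append_singleton, hch]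
  dsimp only [pvStepB]
  rw [hbump]
  push_cast
  rfl

theorem pv_innerB_sound (l : List Char) (i : Nat) :
    ∀ (m : List Char) (t : Nat) (res : Int), l.drop (i + t) = m →
    (res = 0 ∨ ∃ p q : Nat, pvOkPair l p q ∧ res = (q : Int) - p) →
    ((m.foldl pvStepB (pvCnt ((l.take (i + t)).drop i), (t : Int), res)).2.2 = 0 ∨
      ∃ p q : Nat, pvOkPair l p q ∧
        (m.foldl pvStepB (pvCnt ((l.take (i + t)).drop i), (t : Int), res)).2.2 = (q : Int) - p) := by
  intro m
  induction m with
  | nil => exact fun t res _ hP => hP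
  | cons ch m' ih =>
    intro t res hm hP
    have hlen : i + t < l.length := by
      have := congrArg List.length hm
      simp at this
      omega
    have hch : l[i + t] = ch := by
      have h0 : (l.drop (i + t))[0]'(by rw [hm]; simp) = ch := by simp [hm]
      simpa using h0
    rw [List.foldl_cons, pv_stepB_state l i t res ch hlen hch]
    refine ih (t + 1) _ (by rw [show i + (t + 1) = i + t + 1 from rfl, ← List.tail_drop, hm]; rfl) ?_
    by_cases hok : pvOk (pvCnt ((l.take (i + t + 1)).drop i)).1
        (pvCnt ((l.take (i + t + 1)).drop i)).2.1
        (pvCnt ((l.take (i + t + 1)).drop i)).2.2 = true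
    · rw [if_pos hok]
      rcases max_choice res ((t : Int) + 1) with hmx | hmx
      · rw [hmx]
        exact hP
      · rw [hmx]
        refine Or.inr ⟨i, i + t + 1, ⟨by omega, by omega, ?_⟩, by push_cast; ring⟩
        have hok2 := hok
        rw [pvSeg_cnt l i (i + t + 1) (by omega)] at hok2
        simpa using hok2
    · rw [if_neg hok]
      exact hP

theorem pv_innerB_complete (l : List Char) (i : Nat) :
    ∀ (m : List Char) (t : Nat) (res : Int), l.drop (i + t) = m →
    ∀ q : Nat, i + t < q → pvOkPair l i q →
    (q : Int) - i ≤ (m.foldl pvStepB (pvCnt ((l.take (i + t)).drop i), (t : Int), res)).2.2 := by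
  intro m
  induction m with
  | nil =>
    intro t res hm q hq hok
    exfalso
    have := congrArg List.length hm
    simp at this
    obtain ⟨_, hqlen, _⟩ := hok
    omega
  | cons ch m' ih =>
    intro t res hm q hq hok
    have hlen : i + t < l.length := by
      have := congrArg List.length hm
      simp at this
      omega
    have hch : l[i + t] = ch := by
      have h0 : (l.drop (i + t))[0]'(by rw [hm]; simp) = ch := by simp [hm]
      simpa using h0
    rw [List.foldl_cons, pv_stepB_state l i t res ch hlen hch]
    have hm' : l.drop (i + (t + 1)) = m' := by
      rw [show i + (t + 1) = i + t + 1 from rfl, ← List.tail_drop, hm]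
      rfl
    rcases Nat.lt_or_ge (i + t + 1) q with hlt | hge
    · exact ih (t + 1) _ hm' q (by omega) hok
    · have hqe : q = i + t + 1 := by omega
      subst hqe
      refine le_trans ?_ (pv_innerB_ge m' _ _ _)
      have hokC : pvOk (pvCnt ((l.take (i + t + 1)).drop i)).1
          (pvCnt ((l.take (i + t + 1)).drop i)).2.1
          (pvCnt ((l.take (i + t + 1)).drop i)).2.2 = true := by
        rw [pvSeg_cnt l i (i + t + 1) (by omega)]
        exact hok.2.2
      rw [if_pos hokC]
      refine le_trans (le_of_eq (by push_cast; ring)) (le_max_right res _)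

theorem pv_zeroSeg (l : List Char) (i : Nat) :
    pvCnt ((l.take (i + 0)).drop i) = ((0, 0, 0) : Int × Int × Int) := by
  rw [List.drop_eq_nil_of_le (by simp)]
  rfl

theorem pv_B_isBest (s : String) : pvIsBest s.toList (longestBalanced_alt s) := by
  unfold longestBalanced_alt
  refine ⟨?_, ?_, ?_⟩
  · apply pv_foldl_ge_init
    intro r i
    exact pv_innerB_ge _ _ _ _
  · intro p q hok
    have hpn : p ∈ List.range s.toList.length := by
      obtain ⟨h1, h2, _⟩ := hok
      exact List.mem_range.2 (by omega)
    refine pv_le_foldl_of_mem _ (fun r i => pv_innerB_ge _ _ _ _) _ p _ hpn ?_ _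
    intro r
    have h := pv_innerB_complete s.toList p (s.toList.drop (p + 0)) 0 r rfl q
      (by obtain ⟨h1, _, _⟩ := hok; omega) hok
    rw [pv_zeroSeg, Nat.cast_zero] at h
    exact h
  · refine pv_foldl_preserve
      (fun r => r = 0 ∨ ∃ p q : Nat, pvOkPair s.toList p q ∧ r = (q : Int) - p)
      _ _ ?_ _ (Or.inl rfl)
    intro r i _ hP
    have h := pv_innerB_sound s.toList i (s.toList.drop (i + 0)) 0 r rfl hP
    rw [pv_zeroSeg, Nat.cast_zero] at h
    exact h

-- ===== VERDICT (by name: the statement is the Claim_ definition above) =====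
theorem longestBalanced_spec : Claim_equal_longestBalanced := by
  intro s _
  unfold Spec_longestBalanced
  rw [pv_A_eq_resA]
  exact pv_isBest_unique s.toList _ _ (pv_resA_isBest s.toList) (pv_B_isBest s)
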